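-- pv_equiv track=rewrite | github.com/EmbeddedGUI/EmbeddedGUI_Designer | package_ui_designer.py | iter_filtered_build_output
-- ===== SOURCE A (Python) =====
-- SUPPRESSED_LOG_SNIPPETS = (
--     "QFluentWidgets Pro is now released",
--     "qfluentwidgets.com/pages/pro",
-- )
--
-- def should_suppress_build_output(line: str) -> bool:
--     """Return True when a build log line is pure third-party promotion noise."""
--     text = line or ""
--     return any(snippet in text for snippet in SUPPRESSED_LOG_SNIPPETS)
--
-- def iter_filtered_build_output(lines):
--     """Yield build output while stripping known third-party promotion lines."""
--     suppress_blank_lines = False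
--     pending_blank_lines: list[str] = []
--     for line in lines:
--         if not line.strip():
--             pending_blank_lines.append(line)
--             continue
--         if should_suppress_build_output(line):
--             pending_blank_lines.clear()
--             suppress_blank_lines = True
--             continue
--         if suppress_blank_lines:
--             pending_blank_lines.clear()
--         suppress_blank_lines = False
--         if pending_blank_lines:
--             for blank_line in pending_blank_lines:
--                 yield blank_line
--             pending_blank_lines.clear()
--         yield line
-- ===== SOURCE B (Python) =====
-- SUPPRESSED_LOG_SNIPPETS = (
--     "QFluentWidgets Pro is now released",
--     "qfluentwidgets.com/pages/pro",
-- )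
--
--
-- def _line_kind(line):
--     """0 = blank, 1 = promotion, 2 = ordinary content."""
--     if not line.strip():
--         return 0
--     if any(snippet in (line or "") for snippet in SUPPRESSED_LOG_SNIPPETS):
--         return 1
--     return 2
--
--
-- def iter_filtered_build_output(lines):
--     """Yield build output while stripping known third-party promotion lines."""
--     lines = list(lines)
--     n = len(lines)
--     kinds = [_line_kind(line) for line in lines]
--     # backward pass: nxt[i] = kind of the nearest non-blank line at index >= i (None if none)
--     nxt = [None] * n
--     carry = None
--     for i in range(n - 1, -1, -1):
--         if kinds[i] != 0:
--             carry = kinds[i]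
--         nxt[i] = carry
--     # forward pass: a blank survives iff no promo since the last content line
--     # and the next non-blank line is content
--     clean = True
--     for i in range(n):
--         if kinds[i] == 2:
--             clean = True
--             yield lines[i]
--         elif kinds[i] == 1:
--             clean = False
--         elif clean and nxt[i] == 2:
--             yield lines[i]
-- ===== Notes on version B (the rewrite author's own statement) =====
-- stated objective: alternative
-- what changed: Replaces A's stateful pending-blank buffer with a two-pass scheme: classify each line (blank/promo/content), compute the kind of the next non-blank line by a backward pass, then decide each blank locally (kept iff no promo since the last content line and the next non-blank line is content); no buffering.
import Mathlib
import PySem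

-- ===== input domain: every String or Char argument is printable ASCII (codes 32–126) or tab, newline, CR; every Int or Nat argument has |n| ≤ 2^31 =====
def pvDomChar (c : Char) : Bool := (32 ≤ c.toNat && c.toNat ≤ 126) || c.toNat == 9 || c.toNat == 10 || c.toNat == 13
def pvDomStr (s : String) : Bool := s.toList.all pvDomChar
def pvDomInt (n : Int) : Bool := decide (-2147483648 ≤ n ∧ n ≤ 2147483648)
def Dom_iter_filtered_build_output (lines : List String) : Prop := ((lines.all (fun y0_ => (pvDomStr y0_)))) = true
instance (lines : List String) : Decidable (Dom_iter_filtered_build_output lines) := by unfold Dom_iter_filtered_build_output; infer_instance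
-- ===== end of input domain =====

-- B replaces A's stateful pending-blank buffer with a classify + backward next-non-blank pass
-- and a local per-blank decision (objective: alternative decomposition, same cost).

-- ===== PORT A =====
def SUPPRESSED_LOG_SNIPPETS : List String :=
  ["QFluentWidgets Pro is now released", "qfluentwidgets.com/pages/pro"]

def should_suppress_build_output (line : String) : Bool :=
  SUPPRESSED_LOG_SNIPPETS.any (fun snippet => PySem.Str.isIn snippet line)

-- the loop body of A: state = (suppress_blank_lines, pending_blank_lines, out)
def pvAStep (st : Bool × List String × List String) (line : String) :
    Bool × List String × List String :=
  let suppress_blank_lines := st.1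
  let pending_blank_lines := st.2.1
  let out := st.2.2
  if PySem.Str.strip line = "" then
    (suppress_blank_lines, pending_blank_lines ++ [line], out)
  else if should_suppress_build_output line then
    (true, [], out)
  else
    let pending_blank_lines := if suppress_blank_lines then [] else pending_blank_lines
    (false, [], out ++ pending_blank_lines ++ [line])

-- A is a generator; its port accumulates the yielded lines in an output list.
def iter_filtered_build_output (lines : List String) : List String :=
  (lines.foldl pvAStep (false, [], [])).2.2

-- ===== PORT B =====
-- _line_kind: 0 = blank, 1 = promotion, 2 = ordinary content
def pvLineKind (line : String) : Nat :=
  if PySem.Str.strip line = "" then 0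
  else if SUPPRESSED_LOG_SNIPPETS.any (fun snippet => PySem.Str.isIn snippet line) then 1
  else 2

-- backward pass of B: nxt[i] = nearest non-blank kind at index ≥ i
def pvNxt : List Nat → List (Option Nat)
  | [] => []
  | k :: ks =>
    let rest := pvNxt ks
    (if k ≠ 0 then some k else rest.headD none) :: rest

-- forward pass of B over (line, kind, nxt) triples: state = (clean, out)
def pvBStep (st : Bool × List String) (p : (String × Nat) × Option Nat) :
    Bool × List String :=
  let clean := st.1
  let out := st.2
  let line := p.1.1
  let k := p.1.2
  let nk := p.2
  if k = 2 then (true, out ++ [line])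
  else if k = 1 then (false, out)
  else if clean ∧ nk = some 2 then (clean, out ++ [line])
  else (clean, out)

def iter_filtered_build_output_alt (lines : List String) : List String :=
  let kinds := lines.map pvLineKind
  let nxt := pvNxt kinds
  (((lines.zip kinds).zip nxt).foldl pvBStep (true, [])).2

-- ===== PRECONDITION & SPEC =====
def Spec_iter_filtered_build_output (lines : List String) (out : List String) : Prop := out = iter_filtered_build_output_alt lines
instance (lines : List String) (out : List String) : Decidable (Spec_iter_filtered_build_output lines out) := by unfold Spec_iter_filtered_build_output; infer_instance

-- ===== CLAIM (what is proved, stated in full; the proofs are below) =====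
def Claim_equal_iter_filtered_build_output : Prop := ∀ (lines : List String), Dom_iter_filtered_build_output lines → Spec_iter_filtered_build_output lines (iter_filtered_build_output lines)

-- ===== LEMMAS AND PROOFS =====

-- kind of the first non-blank line (head of pvNxt)
def pvNnb : List Nat → Option Nat
  | [] => none
  | k :: ks => if k ≠ 0 then some k else pvNnb ks

lemma pvNxt_headD (ks : List Nat) : (pvNxt ks).head?.getD none = pvNnb ks := by
  induction ks with
  | nil => rfl
  | cons k ks ih => simp [pvNxt, pvNnb, ih]

lemma pvZipCons (l : String) (rest : List String) :
    (((l :: rest).zip ((l :: rest).map pvLineKind)).zip (pvNxt ((l :: rest).map pvLineKind)))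
      = ((l, pvLineKind l),
          if pvLineKind l ≠ 0 then some (pvLineKind l) else pvNnb (rest.map pvLineKind))
        :: ((rest.zip (rest.map pvLineKind)).zip (pvNxt (rest.map pvLineKind))) := by
  simp [pvNxt, pvNxt_headD]

lemma pvLineKind_cases (l : String) : pvLineKind l = 0 ∨ pvLineKind l = 1 ∨ pvLineKind l = 2 := by
  unfold pvLineKind; split_ifs <;> simp

-- the output A appends while consuming `rest` from state (suppress, pending)
def pvARun : List String → Bool → List String → List String
  | [], _, _ => []
  | l :: rest, s, p =>
    if PySem.Str.strip l = "" then pvARun rest s (p ++ [l])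
    else if should_suppress_build_output l then pvARun rest true []
    else (if s then [] else p) ++ l :: pvARun rest false []

lemma aFold (lines : List String) : ∀ (s : Bool) (p out : List String),
    (lines.foldl pvAStep (s, p, out)).2.2 = out ++ pvARun lines s p := by
  induction lines with
  | nil => intro s p out; simp [pvARun]
  | cons l rest ih =>
    intro s p out
    rw [List.foldl_cons]
    by_cases hb : PySem.Str.strip l = ""
    · rw [show pvAStep (s, p, out) l = (s, p ++ [l], out) from by simp [pvAStep, hb],
        ih, pvARun, if_pos hb]
    · by_cases hp : should_suppress_build_output l
      · rw [show pvAStep (s, p, out) l = (true, [], out) from by simp [pvAStep, hb, hp],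
          ih, pvARun, if_neg hb, if_pos hp]
      · rw [show pvAStep (s, p, out) l
            = (false, [], out ++ (if s then [] else p) ++ [l]) from by simp [pvAStep, hb, hp],
          ih, pvARun, if_neg hb, if_neg hp]
        simp

-- the output B appends while consuming `rest` with flag `clean`
def pvBRun : List String → Bool → List String
  | [], _ => []
  | l :: rest, clean =>
    if pvLineKind l = 2 then l :: pvBRun rest true
    else if pvLineKind l = 1 then pvBRun rest false
    else (if clean ∧ pvNnb (rest.map pvLineKind) = some 2 then [l] else []) ++ pvBRun rest clean

lemma bFold (lines : List String) : ∀ (clean : Bool) (out : List String),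
    ((((lines.zip (lines.map pvLineKind)).zip (pvNxt (lines.map pvLineKind))).foldl
      pvBStep (clean, out)).2) = out ++ pvBRun lines clean := by
  induction lines with
  | nil => intro clean out; simp [pvBRun]
  | cons l rest ih =>
    intro clean out
    rw [pvZipCons, List.foldl_cons]
    by_cases h2 : pvLineKind l = 2
    · simp [pvBStep, h2, ih, pvBRun]
    · by_cases h1 : pvLineKind l = 1
      · simp [pvBStep, h2, h1, ih, pvBRun]
      · have h0 : pvLineKind l = 0 := by
          rcases pvLineKind_cases l with h | h | h <;> simp_all
        by_cases hc : clean = true ∧ pvNnb (rest.map pvLineKind) = some 2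
        · simp [pvBStep, h0, hc.1, hc.2, ih, pvBRun]
        · rcases Decidable.not_and_iff_not_or_not.mp hc with h | h <;>
            simp [pvBStep, h0, h, hc, ih, pvBRun]

-- main invariant: A's remaining output = (pending, kept iff clean ∧ next non-blank is content) ++ B's
lemma mainRun (lines : List String) : ∀ (s : Bool) (p : List String),
    pvARun lines s p
      = (if s = false ∧ pvNnb (lines.map pvLineKind) = some 2 then p else []) ++ pvBRun lines (!s) := by
  induction lines with
  | nil => intro s p; simp [pvARun, pvBRun, pvNnb]
  | cons l rest ih =>
    intro s p
    have hkr : pvLineKind l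
        = (if PySem.Str.strip l = "" then 0
           else if should_suppress_build_output l then 1 else 2) := rfl
    by_cases hb : PySem.Str.strip l = ""
    · have h0 : pvLineKind l = 0 := by rw [hkr, if_pos hb]
      rw [pvARun, if_pos hb, ih]
      by_cases hc : s = false ∧ pvNnb (rest.map pvLineKind) = some 2
      · simp [h0, pvBRun, pvNnb, hc.1, hc.2]
      · have hcc : ¬ (s = false ∧ pvNnb ((l :: rest).map pvLineKind) = some 2) := by
          simpa [h0, pvNnb] using hc
        rcases Decidable.not_and_iff_not_or_not.mp hc with h | h <;>
          simp [h0, pvBRun, pvNnb, h, hcc]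
    · by_cases hp : should_suppress_build_output l
      · have h1 : pvLineKind l = 1 := by rw [hkr, if_neg hb, if_pos hp]
        rw [pvARun, if_neg hb, if_pos hp, ih]
        simp [h1, pvBRun, pvNnb]
      · have h2 : pvLineKind l = 2 := by rw [hkr, if_neg hb, if_neg hp]
        rw [pvARun, if_neg hb, if_neg hp, ih]
        cases s <;> simp [h2, pvBRun, pvNnb]

-- ===== VERDICT (by name: the statement is the Claim_ definition above) =====
theorem iter_filtered_build_output_spec : Claim_equal_iter_filtered_build_output := by
  intro lines _
  unfold Spec_iter_filtered_build_output iter_filtered_build_output iter_filtered_build_output_alt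
  rw [aFold, bFold, mainRun]
  simp
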